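-- pv_equiv track=rewrite | github.com/bilingual-vovs/school-python | Eolymp/488.py | solutin
-- ===== SOURCE A (Python) =====
-- def solutin(n):
--     r2 = []
--     for x in range(n):
--         r1 = []
--         for y in range(n):
--             if x%2 == 0:
--                 r1.append(x*n+y+1)
--             else:
--                 r1.append(n*(x+1)-y)
--         r2.append(r1)
--     return r2
-- ===== SOURCE B (Python) =====
-- def solutin(n):
--     if n <= 0:
--         return []
--     out, row, forward = [], [], True
--     for v in range(1, n * n + 1):
--         row.append(v)
--         if len(row) == n:
--             out.append(row if forward else row[::-1])
--             row, forward = [], not forward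
--     return out
-- ===== Notes on version B (the rewrite author's own statement) =====
-- stated objective: alternative
-- what changed: B makes a single serpentine pass over the flat value stream 1..n*n with a direction flag, accumulating a current row and emitting it (reversed when moving backwards) each time it reaches length n, instead of A's nested loops computing every cell from a parity-dependent index formula.
import Mathlib
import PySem

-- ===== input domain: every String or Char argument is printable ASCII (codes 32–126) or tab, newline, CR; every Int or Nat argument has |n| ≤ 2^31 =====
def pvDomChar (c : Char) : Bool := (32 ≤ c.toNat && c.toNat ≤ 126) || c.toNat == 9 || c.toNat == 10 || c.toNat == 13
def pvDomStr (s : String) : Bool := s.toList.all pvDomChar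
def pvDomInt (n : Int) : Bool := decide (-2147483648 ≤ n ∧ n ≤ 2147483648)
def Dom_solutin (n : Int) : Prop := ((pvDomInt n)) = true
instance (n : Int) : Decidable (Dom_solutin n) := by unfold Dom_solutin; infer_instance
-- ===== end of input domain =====

-- B replaces A's nested index-formula loops by one serpentine pass over the values 1..n*n
-- that appends/prepends into a current row and emits it when full (alternative decomposition, same cost).

-- ===== PORT A =====
def solutin (n : Int) : List (List Int) :=
  (PySem.List.pyRange 0 n 1).foldl
    (fun r2 x =>
      r2 ++ [(PySem.List.pyRange 0 n 1).foldl
        (fun r1 y =>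
          r1 ++ [if PySem.Int.mod x 2 = 0 then x * n + y + 1 else n * (x + 1) - y])
        []])
    []

-- ===== PORT B =====
-- one iteration of B's loop: state = (out, row, forward); row[::-1] on emit when not forward
def solutinStep (n : Int) (st : List (List Int) × List Int × Bool) (v : Int) :
    List (List Int) × List Int × Bool :=
  let row' := st.2.1 ++ [v]
  if (row'.length : Int) = n then
    (st.1 ++ [if st.2.2 then row' else row'.reverse], [], !st.2.2)
  else (st.1, row', st.2.2)

def solutin_alt (n : Int) : List (List Int) :=
  if n ≤ 0 then []
  else ((PySem.List.pyRange 1 (n * n + 1) 1).foldl (solutinStep n) ([], [], true)).1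

-- ===== PRECONDITION & SPEC =====
def Spec_solutin (n : Int) (out : List (List Int)) : Prop := out = solutin_alt n
instance (n : Int) (out : List (List Int)) : Decidable (Spec_solutin n out) := by unfold Spec_solutin; infer_instance

-- ===== CLAIM (what is proved, stated in full; the proofs are below) =====
def Claim_equal_solutin : Prop := ∀ (n : Int), Dom_solutin n → Spec_solutin n (solutin n)

-- ===== LEMMAS AND PROOFS =====

-- the values of row q of the snake matrix, in ascending order
def snakeVals (N q : Nat) : List Int :=
  (List.range N).map (fun j => (1 : Int) + (q * N + j : Nat))

-- row q of the snake matrix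
def snakeRow (N q : Nat) : List Int :=
  if q % 2 = 0 then snakeVals N q else (snakeVals N q).reverse

-- B's step folded over the values completing the current row emits exactly that row.
theorem fill_row (n : Int) (vs : List Int) :
    ∀ (out : List (List Int)) (row : List Int) (f : Bool), vs ≠ [] →
      ((row.length : Int) + vs.length = n) →
      vs.foldl (solutinStep n) (out, row, f) =
        (out ++ [if f then row ++ vs else (row ++ vs).reverse], [], !f) := by
  induction vs with
  | nil => intro _ _ _ h _; exact absurd rfl h
  | cons v vs ih =>
    intro out row f _ hlen
    by_cases hvs : vs = []
    · subst hvs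
      have hl : ((row.length : Int)) + 1 = n := by simp at hlen; omega
      cases f
      · simp [solutinStep, hl]
      · simp [solutinStep, hl]
    · have hv1 : 0 < vs.length := List.length_pos_of_ne_nil hvs
      have hne : ¬ (((row.length : Int)) + 1 = n) := by simp at hlen; omega
      have hstep : solutinStep n (out, row, f) v = (out, row ++ [v], f) := by
        simp [solutinStep, hne]
      rw [List.foldl_cons, hstep, ih out (row ++ [v]) f hvs (by simp at hlen ⊢; omega)]
      cases f <;> simp

-- folding B's step over the first m*N values builds the first m snake rows
theorem rows_fold (N : Nat) (hN : 1 ≤ N) (m : Nat) :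
    ((List.range (m * N)).map (fun k => (1 : Int) + (k : Nat))).foldl
        (solutinStep (N : Int)) ([], [], true) =
      ((List.range m).map (snakeRow N), [], decide (m % 2 = 0)) := by
  induction m with
  | zero => simp
  | succ m ih =>
    have hsplit : List.range ((m + 1) * N) =
        List.range (m * N) ++ (List.range N).map (fun j => m * N + j) := by
      rw [Nat.succ_mul, List.range_add]
    rw [hsplit, List.map_append, List.foldl_append, ih, List.map_map]
    have hvs : (List.range N).map ((fun k => (1 : Int) + (k : Nat)) ∘ (fun j => m * N + j)) =
        snakeVals N m := by
      simp [snakeVals, Function.comp]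
    rw [hvs]
    have hne : snakeVals N m ≠ [] := by
      intro hcon
      have := congrArg List.length hcon
      simp [snakeVals] at this
      omega
    have hlen : ((([] : List Int)).length : Int) + ((snakeVals N m).length : Int) = (N : Int) := by
      simp [snakeVals]
    rw [fill_row (N : Int) (snakeVals N m) _ [] _ hne hlen]
    rcases Nat.mod_two_eq_zero_or_one m with h | h
    · have h1 : (m + 1) % 2 = 1 := by omega
      simp [List.range_succ, snakeRow, h, h1]
    · have h1 : (m + 1) % 2 = 0 := by omega
      simp [List.range_succ, snakeRow, h, h1]

-- A's row x = q equals row q of the snake matrix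
theorem rowA_eq_snakeRow (N : Nat) (q : Nat) :
    ((List.range N).map fun j =>
        if PySem.Int.mod ((q : Nat) : Int) 2 = 0 then (q : Int) * (N : Int) + (j : Nat) + 1
        else (N : Int) * ((q : Int) + 1) - (j : Nat)) = snakeRow N q := by
  have hmod : PySem.Int.mod ((q : Nat) : Int) 2 = ((q % 2 : Nat) : Int) :=
    PySem.Int.mod_natCast q 2
  rcases Nat.mod_two_eq_zero_or_one q with h | h
  · have hc : PySem.Int.mod ((q : Nat) : Int) 2 = 0 := by rw [hmod, h]; rfl
    rw [snakeRow, if_pos h]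
    simp only [snakeVals]
    apply List.map_congr_left
    intro j _
    rw [if_pos hc]
    push_cast
    ring
  · have hc : ¬ PySem.Int.mod ((q : Nat) : Int) 2 = 0 := by rw [hmod, h]; decide
    rw [snakeRow, if_neg (by omega)]
    apply List.ext_getElem (by simp [snakeVals])
    intro i h1 h2
    have hiN : i < N := by simpa using h1
    simp only [List.getElem_map, List.getElem_range, List.getElem_reverse, snakeVals,
      List.length_map, List.length_range]
    rw [if_neg hc]
    rw [show ((N : Int) * ((q : Int) + 1) - (i : Int)) = ((q * N : Nat) : Int) + (N : Int) - (i : Int)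
      from by push_cast; ring]
    have hsub : N - 1 - i = N - (1 + i) := by omega
    rw [hsub]
    generalize q * N = P
    omega

-- ===== VERDICT (by name: the statement is the Claim_ definition above) =====
theorem solutin_spec : Claim_equal_solutin := by
  intro n _
  unfold Spec_solutin
  by_cases hn : n ≤ 0
  · unfold solutin solutin_alt
    rw [if_pos hn, PySem.List.pyRange_one_eq_nil hn]
    rfl
  · have hn' : 0 < n := by omega
    obtain ⟨N, rfl⟩ : ∃ N : Nat, n = (N : Int) := ⟨n.toNat, (Int.toNat_of_nonneg hn'.le).symm⟩
    have hN : 1 ≤ N := by omega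
    have hB : solutin_alt (N : Int) = (List.range N).map (snakeRow N) := by
      unfold solutin_alt
      rw [if_neg (by omega)]
      have hv : ((N : Int) * (N : Int) + 1 - 1).toNat = N * N := by
        have he : ((N : Int) * (N : Int) + 1 - 1) = ((N * N : Nat) : Int) := by push_cast; ring
        rw [he, Int.toNat_natCast]
      rw [PySem.List.pyRange_one, hv, rows_fold N hN N]
    rw [hB]
    unfold solutin
    rw [PySem.List.foldl_append_singleton_eq_map]
    simp only [List.nil_append]
    have h0 : ((N : Int) - 0).toNat = N := by omega
    rw [PySem.List.pyRange_one, h0, List.map_map]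
    apply List.map_congr_left
    intro q hq
    simp only [Function.comp_apply, zero_add]
    rw [PySem.List.foldl_append_singleton_eq_map]
    simp only [List.nil_append, List.map_map]
    simpa [Function.comp] using rowA_eq_snakeRow N q
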